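-- pv_equiv track=rewrite | github.com/marc-woernle/bu-ai-bibliography | validate_dataset.py | check_anchor_faculty
-- ===== SOURCE A (Python) =====
-- from collections import Counter, defaultdict
--
-- ANCHOR_FACULTY = [
--     # Law — AI program leaders
--     ("Woodrow Hartzog", "School of Law", 20, "directs BU Law AI program"),
--     ("Christopher Robertson", "School of Law", 10, "health law + AI, tenured"),
--     ("James Bessen", "School of Law", 10, "tech economics, prolific"),
--     ("Stacey Dogan", "School of Law", 5, "IP/tech law"),
--     # CS — core AI faculty
--     ("Kate Saenko", "CAS — Computer Science", 50, "ML/vision, 200+ papers in OpenAlex"),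
--     ("Stan Sclaroff", "CAS — Computer Science", 50, "computer vision, senior"),
--     ("Margrit Betke", "CAS — Computer Science", 50, "vision, senior"),
--     ("Ran Canetti", "CAS — Computer Science", 10, "crypto/security"),
--     ("Mark Crovella", "CAS — Computer Science", 10, "networks/ML"),
--     # Engineering
--     ("Calin Belta", "College of Engineering", 50, "robotics/controls, 200+ papers"),
--     ("Ioannis Ch. Paschalidis", "College of Engineering", 50, "optimization/ML, very prolific"),
--     ("Venkatesh Saligrama", "College of Engineering", 50, "ML/stats, very prolific"),
--     ("Roberto Tron", "College of Engineering", 30, "robotics/vision"),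
--     # CDS
--     ("Azer Bestavros", "Faculty of Computing & Data Sciences", 10, "founding dean of CDS"),
--     ("Eric Kolaczyk", "Faculty of Computing & Data Sciences", 15, "network science, CDS dean"),
--     # Medicine
--     ("Vijaya Kolachalama", "School of Medicine", 30, "AI in medicine, prolific"),
--     # Psychology
--     ("Stephen Grossberg", "CAS — Psychology & Brain Sciences", 50, "neural networks pioneer"),
--     # Economics
--     ("Pascual Restrepo", "CAS — Economics", 5, "AI + labor economics"),
--     # SPH
--     ("Eleanor Murray", "School of Public Health", 3, "causal inference, AI methods"),
-- ]
--
-- def _normalize(name: str) -> str: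
--     """Normalize name for matching: strip accents, lowercase."""
--     import unicodedata
--     name = unicodedata.normalize("NFKD", name)
--     name = "".join(c for c in name if not unicodedata.combining(c))
--     return name.lower().strip()
--
-- def check_anchor_faculty(master):
--     """Verify that anchor faculty appear with expected paper counts."""
--     issues = []
--
--     # Build author -> paper count index keyed by (last, first_initial)
--     author_counts = Counter()      # (last, fi) -> count
--     author_display = {}            # (last, fi) -> display name
--     for p in master:
--         for name in p.get("bu_author_names", []):
--             norm = _normalize(name)
--             parts = norm.split()
--             if len(parts) >= 2:
--                 key = (parts[-1], parts[0][0])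
--                 author_counts[key] += 1
--                 author_display[key] = name
--
--     for name, school, min_papers, reason in ANCHOR_FACULTY:
--         norm = _normalize(name)
--         parts = norm.split()
--         key = (parts[-1], parts[0][0]) if len(parts) >= 2 else (norm, "")
--         count = author_counts.get(key, 0)
--         display = author_display.get(key, name)
--         if count == 0:
--             issues.append({
--                 "level": "FAIL",
--                 "check": "anchor_faculty",
--                 "message": f"{name} ({school}) has 0 papers — {reason}",
--             })
--         elif count < min_papers:
--             issues.append({
--                 "level": "WARN",
--                 "check": "anchor_faculty",
--                 "message": f"{display} has {count} papers, expected >={min_papers} — {reason}",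
--             })
--
--     return issues
-- ===== SOURCE B (Python) =====
-- ANCHOR_FACULTY = [
--     ("Woodrow Hartzog", "School of Law", 20, "directs BU Law AI program"),
--     ("Christopher Robertson", "School of Law", 10, "health law + AI, tenured"),
--     ("James Bessen", "School of Law", 10, "tech economics, prolific"),
--     ("Stacey Dogan", "School of Law", 5, "IP/tech law"),
--     ("Kate Saenko", "CAS — Computer Science", 50, "ML/vision, 200+ papers in OpenAlex"),
--     ("Stan Sclaroff", "CAS — Computer Science", 50, "computer vision, senior"),
--     ("Margrit Betke", "CAS — Computer Science", 50, "vision, senior"),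
--     ("Ran Canetti", "CAS — Computer Science", 10, "crypto/security"),
--     ("Mark Crovella", "CAS — Computer Science", 10, "networks/ML"),
--     ("Calin Belta", "College of Engineering", 50, "robotics/controls, 200+ papers"),
--     ("Ioannis Ch. Paschalidis", "College of Engineering", 50, "optimization/ML, very prolific"),
--     ("Venkatesh Saligrama", "College of Engineering", 50, "ML/stats, very prolific"),
--     ("Roberto Tron", "College of Engineering", 30, "robotics/vision"),
--     ("Azer Bestavros", "Faculty of Computing & Data Sciences", 10, "founding dean of CDS"),
--     ("Eric Kolaczyk", "Faculty of Computing & Data Sciences", 15, "network science, CDS dean"),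
--     ("Vijaya Kolachalama", "School of Medicine", 30, "AI in medicine, prolific"),
--     ("Stephen Grossberg", "CAS — Psychology & Brain Sciences", 50, "neural networks pioneer"),
--     ("Pascual Restrepo", "CAS — Economics", 5, "AI + labor economics"),
--     ("Eleanor Murray", "School of Public Health", 3, "causal inference, AI methods"),
-- ]
--
-- def _normalize(name: str) -> str:
--     """Normalize name for matching: strip accents, lowercase."""
--     import unicodedata
--     name = unicodedata.normalize("NFKD", name)
--     name = "".join(c for c in name if not unicodedata.combining(c))
--     return name.lower().strip()
--
--
-- def _key(name):
--     """(last, first_initial) key, or None if the normalized name has < 2 parts."""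
--     parts = _normalize(name).split()
--     return (parts[-1], parts[0][0]) if len(parts) >= 2 else None
--
--
-- def check_anchor_faculty(master):
--     """Verify that anchor faculty appear with expected paper counts.
--
--     Instead of A's Counter/display dicts, flatten all BU author names into one
--     keyed occurrence list, and derive each anchor's count (= number of key
--     matches) and display name (= last matching occurrence) by filtering it."""
--     keyed = [(_key(author), author)
--              for p in master
--              for author in p.get("bu_author_names", [])
--              if _key(author) is not None]
--
--     def issue_for(anchor):
--         name, school, min_papers, reason = anchor
--         key = _key(name)
--         if key is None:
--             key = (_normalize(name), "")
--         matches = [author for k, author in keyed if k == key]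
--         if not matches:
--             return {
--                 "level": "FAIL",
--                 "check": "anchor_faculty",
--                 "message": f"{name} ({school}) has 0 papers — {reason}",
--             }
--         if len(matches) < min_papers:
--             return {
--                 "level": "WARN",
--                 "check": "anchor_faculty",
--                 "message": f"{matches[-1]} has {len(matches)} papers, expected >={min_papers} — {reason}",
--             }
--         return None
--
--     return [issue for issue in map(issue_for, ANCHOR_FACULTY) if issue is not None]
-- ===== Notes on version B (the rewrite author's own statement) =====
-- stated objective: alternative
-- what changed: B replaces A's Counter/display-dict index and append-style issue loop by a flattened keyed occurrence list from which each anchor's count is a filter length and its display name the last matching occurrence, with the issue list produced by filtering out None results of a per-anchor function.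
import Mathlib
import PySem

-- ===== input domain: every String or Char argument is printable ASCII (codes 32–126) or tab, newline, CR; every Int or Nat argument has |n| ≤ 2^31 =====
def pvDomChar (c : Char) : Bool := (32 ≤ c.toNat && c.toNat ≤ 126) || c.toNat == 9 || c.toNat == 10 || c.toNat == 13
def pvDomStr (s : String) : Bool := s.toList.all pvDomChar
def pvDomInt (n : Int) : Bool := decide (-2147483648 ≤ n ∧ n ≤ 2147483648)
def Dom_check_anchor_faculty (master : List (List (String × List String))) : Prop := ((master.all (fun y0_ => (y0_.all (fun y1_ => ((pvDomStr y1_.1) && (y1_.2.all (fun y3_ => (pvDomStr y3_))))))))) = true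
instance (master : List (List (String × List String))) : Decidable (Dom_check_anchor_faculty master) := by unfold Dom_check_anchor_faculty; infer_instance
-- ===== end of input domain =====

-- B replaces A's Counter/display-dict index and append-style issue loop by a flattened keyed
-- occurrence list (count = filter length, display = last matching occurrence) and a
-- filter-out-None issue construction; same results, an alternative decomposition.

-- shared module context (the ANCHOR_FACULTY constant and _normalize, used by both A and B)
def anchorFaculty : List (String × String × Int × String) := [
  ("Woodrow Hartzog", "School of Law", 20, "directs BU Law AI program"),
  ("Christopher Robertson", "School of Law", 10, "health law + AI, tenured"),
  ("James Bessen", "School of Law", 10, "tech economics, prolific"),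
  ("Stacey Dogan", "School of Law", 5, "IP/tech law"),
  ("Kate Saenko", "CAS — Computer Science", 50, "ML/vision, 200+ papers in OpenAlex"),
  ("Stan Sclaroff", "CAS — Computer Science", 50, "computer vision, senior"),
  ("Margrit Betke", "CAS — Computer Science", 50, "vision, senior"),
  ("Ran Canetti", "CAS — Computer Science", 10, "crypto/security"),
  ("Mark Crovella", "CAS — Computer Science", 10, "networks/ML"),
  ("Calin Belta", "College of Engineering", 50, "robotics/controls, 200+ papers"),
  ("Ioannis Ch. Paschalidis", "College of Engineering", 50, "optimization/ML, very prolific"),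
  ("Venkatesh Saligrama", "College of Engineering", 50, "ML/stats, very prolific"),
  ("Roberto Tron", "College of Engineering", 30, "robotics/vision"),
  ("Azer Bestavros", "Faculty of Computing & Data Sciences", 10, "founding dean of CDS"),
  ("Eric Kolaczyk", "Faculty of Computing & Data Sciences", 15, "network science, CDS dean"),
  ("Vijaya Kolachalama", "School of Medicine", 30, "AI in medicine, prolific"),
  ("Stephen Grossberg", "CAS — Psychology & Brain Sciences", 50, "neural networks pioneer"),
  ("Pascual Restrepo", "CAS — Economics", 5, "AI + labor economics"),
  ("Eleanor Murray", "School of Public Health", 3, "causal inference, AI methods")]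

-- _normalize: NFKD normalization and combining-mark removal are the identity on the ASCII input domain,
-- so on Dom this is exactly name.lower().strip()
def pvNorm (s : String) : String := PySem.Str.strip (PySem.Str.lower s)

-- '(parts[-1], parts[0][0])' under the guard 'len(parts) >= 2' (none when the guard fails).
-- split() words are nonempty, so 'take 1' of the first word is exactly its first character parts[0][0].
def pvKey? (s : String) : Option (String × String) :=
  match PySem.Str.split₀ (pvNorm s) with
  | p0 :: p1 :: rest => some ((p1 :: rest).getLast (by simp), String.ofList (p0.toList.take 1))
  | _ => none

-- p.get("bu_author_names", []) (first-match association-list lookup, per the dict convention)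
def pvGetNames (p : List (String × List String)) : List String :=
  (PySem.Dict.mk p).getD "bu_author_names" []

-- ===== PORT A =====
-- key for an anchor name: '(parts[-1], parts[0][0]) if len(parts) >= 2 else (norm, "")'
def pvAnchorKey (name : String) : String × String :=
  match pvKey? name with
  | some k => k
  | none => (pvNorm name, "")

-- the index-building loop of A: Counter 'author_counts[key] += 1' and 'author_display[key] = name'
def pvStepA (cd : PySem.Dict (String × String) Int × PySem.Dict (String × String) String)
    (name : String) : PySem.Dict (String × String) Int × PySem.Dict (String × String) String :=
  match pvKey? name with
  | some key => (cd.1.modify key 0 (· + 1), cd.2.insert key name)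
  | none => cd

def check_anchor_faculty (master : List (List (String × List String))) : List (List (String × String)) :=
  let idx := master.foldl (fun cd p => (pvGetNames p).foldl pvStepA cd)
      (PySem.Dict.empty, PySem.Dict.empty)
  anchorFaculty.foldl (fun issues a =>
    let name := a.1; let school := a.2.1; let min_papers := a.2.2.1; let reason := a.2.2.2
    let key := pvAnchorKey name
    let count := idx.1.getD key 0
    let display := idx.2.getD key name
    if count = 0 then
      issues ++ [[("level", "FAIL"), ("check", "anchor_faculty"),
        ("message", name ++ " (" ++ school ++ ") has 0 papers — " ++ reason)]]
    else if count < min_papers then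
      issues ++ [[("level", "WARN"), ("check", "anchor_faculty"),
        ("message", display ++ " has " ++ PySem.Int.toStr count ++ " papers, expected >=" ++ PySem.Int.toStr min_papers ++ " — " ++ reason)]]
    else issues) []

-- ===== PORT B =====
-- B's per-anchor issue: count = length of the key-matching entries of the flattened keyed
-- occurrence list, display = its last element (matches[-1]); None when the anchor passes
def pvIssueFor (keyed : List ((String × String) × String))
    (a : String × String × Int × String) : Option (List (String × String)) :=
  let key := match pvKey? a.1 with | some k => k | none => (pvNorm a.1, "")
  let matched := (keyed.filter (fun e => e.1 == key)).map (fun e => e.2)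
  if matched.isEmpty then
    some [("level", "FAIL"), ("check", "anchor_faculty"),
      ("message", a.1 ++ " (" ++ a.2.1 ++ ") has 0 papers — " ++ a.2.2.2)]
  else if (matched.length : Int) < a.2.2.1 then
    some [("level", "WARN"), ("check", "anchor_faculty"),
      ("message", (matched.getLast?.getD a.1) ++ " has " ++ PySem.Int.toStr (matched.length : Int) ++ " papers, expected >=" ++ PySem.Int.toStr a.2.2.1 ++ " — " ++ a.2.2.2)]
  else none

def check_anchor_faculty_alt (master : List (List (String × List String))) : List (List (String × String)) :=
  let keyed := (master.flatMap pvGetNames).filterMap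
      (fun author => (pvKey? author).map (fun k => (k, author)))
  (anchorFaculty.map (pvIssueFor keyed)).filterMap id

-- ===== PRECONDITION & SPEC =====
def Spec_check_anchor_faculty (master : List (List (String × List String))) (out : List (List (String × String))) : Prop := out = check_anchor_faculty_alt master
instance (master : List (List (String × List String))) (out : List (List (String × String))) : Decidable (Spec_check_anchor_faculty master out) := by unfold Spec_check_anchor_faculty; infer_instance

-- ===== CLAIM (what is proved, stated in full; the proofs are below) =====
def Claim_equal_check_anchor_faculty : Prop := ∀ (master : List (List (String × List String))), Dom_check_anchor_faculty master → Spec_check_anchor_faculty master (check_anchor_faculty master)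

-- ===== LEMMAS AND PROOFS =====

-- proof-side bridge: a per-key scan (count, last match) over a name list
def pvStepB (key : String × String) (cd : Int × String) (author : String) : Int × String :=
  match pvKey? author with
  | some k => if k = key then (cd.1 + 1, author) else cd
  | none => cd

-- B's keyed entries of a name list, restricted to one key, projected to the display names
def pvMatches (key : String × String) (L : List String) : List String :=
  ((L.filterMap (fun author => (pvKey? author).map (fun k => (k, author)))).filter
    (fun e => e.1 == key)).map (fun e => e.2)

-- A's index folded over one name list vs the per-key scan of the same list
lemma inner_agree (names : List String) (c : PySem.Dict (String × String) Int)
    (d : PySem.Dict (String × String) String) (key : String × String) (s : String) :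
    ((names.foldl pvStepA (c, d)).1.getD key 0, (names.foldl pvStepA (c, d)).2.getD key s)
      = names.foldl (pvStepB key) (c.getD key 0, d.getD key s) := by
  induction names generalizing c d s with
  | nil => rfl
  | cons n ns ih =>
    simp only [List.foldl_cons]
    cases h : pvKey? n with
    | none =>
      simp only [pvStepA, pvStepB, h]
      exact ih c d s
    | some k =>
      simp only [pvStepA, pvStepB, h]
      have hinit : ((c.modify k 0 (· + 1)).getD key 0, (d.insert k n).getD key s)
          = (if k = key then (c.getD key 0 + 1, n) else (c.getD key 0, d.getD key s)) := by
        rw [PySem.Dict.getD_modify, PySem.Dict.getD_insert]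
        by_cases hk : k = key
        · subst hk; simp
        · have hk' : ¬ (key = k) := fun h' => hk h'.symm
          simp [hk, hk']
      rw [ih, hinit]

-- the same, folded over the whole master list
lemma outer_agree (master : List (List (String × List String)))
    (c : PySem.Dict (String × String) Int) (d : PySem.Dict (String × String) String)
    (key : String × String) (s : String) :
    (((master.foldl (fun cd p => (pvGetNames p).foldl pvStepA cd) (c, d))).1.getD key 0,
     ((master.foldl (fun cd p => (pvGetNames p).foldl pvStepA cd) (c, d))).2.getD key s)
      = master.foldl (fun cd p => (pvGetNames p).foldl (pvStepB key) cd) (c.getD key 0, d.getD key s) := by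
  induction master generalizing c d s with
  | nil => rfl
  | cons p ps ih =>
    simp only [List.foldl_cons]
    have h1 := inner_agree (pvGetNames p) c d key s
    have h2 := ih ((pvGetNames p).foldl pvStepA (c, d)).1 ((pvGetNames p).foldl pvStepA (c, d)).2 s
    rw [show ((pvGetNames p).foldl pvStepA (c, d)) =
        (((pvGetNames p).foldl pvStepA (c, d)).1, ((pvGetNames p).foldl pvStepA (c, d)).2) from rfl] at h1 ⊢
    rw [h2, ← h1]

-- 'matches[-1] if matches else s', pushed under a cons
lemma getLastD_cons (M : List String) : ∀ (n s : String),
    (n :: M).getLast?.getD s = M.getLast?.getD n := by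
  induction M with
  | nil => intro n s; rfl
  | cons m M ih =>
    intro n s
    rw [List.getLast?_cons_cons, ih m s, ih m n]

-- the per-key scan computes (initial count + #matches, last match or the initial display)
lemma stepB_char (key : String × String) (L : List String) : ∀ (c : Int) (s : String),
    L.foldl (pvStepB key) (c, s)
      = (c + ((pvMatches key L).length : Int), (pvMatches key L).getLast?.getD s) := by
  induction L with
  | nil => intro c s; simp [pvMatches]
  | cons n L ih =>
    intro c s
    simp only [List.foldl_cons]
    cases h : pvKey? n with
    | none =>
      simp only [pvStepB, h]
      rw [ih c s]
      simp [pvMatches, h]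
    | some k =>
      by_cases hk : k = key
      · subst hk
        simp only [pvStepB, h, if_pos trivial]
        rw [ih (c + 1) n]
        have hm : pvMatches k (n :: L) = n :: pvMatches k L := by
          simp [pvMatches, h]
        rw [hm, getLastD_cons]
        refine Prod.ext ?_ rfl
        simp only [List.length_cons]
        push_cast
        ring
      · simp only [pvStepB, h, if_neg hk]
        rw [ih c s]
        have hm : pvMatches key (n :: L) = pvMatches key L := by
          simp [pvMatches, h, hk]
        rw [hm]

-- one anchor of A's issue loop, written as 'acc ++ optional issue'
lemma anchor_step (master : List (List (String × List String)))
    (a : String × String × Int × String) (acc : List (List (String × String))) :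
    (if (master.foldl (fun cd p => (pvGetNames p).foldl pvStepA cd)
          (PySem.Dict.empty, PySem.Dict.empty)).1.getD (pvAnchorKey a.1) 0 = 0 then
       acc ++ [[("level", "FAIL"), ("check", "anchor_faculty"),
         ("message", a.1 ++ " (" ++ a.2.1 ++ ") has 0 papers — " ++ a.2.2.2)]]
     else if (master.foldl (fun cd p => (pvGetNames p).foldl pvStepA cd)
          (PySem.Dict.empty, PySem.Dict.empty)).1.getD (pvAnchorKey a.1) 0 < a.2.2.1 then
       acc ++ [[("level", "WARN"), ("check", "anchor_faculty"),
         ("message", (master.foldl (fun cd p => (pvGetNames p).foldl pvStepA cd)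
             (PySem.Dict.empty, PySem.Dict.empty)).2.getD (pvAnchorKey a.1) a.1
           ++ " has " ++ PySem.Int.toStr ((master.foldl (fun cd p => (pvGetNames p).foldl pvStepA cd)
             (PySem.Dict.empty, PySem.Dict.empty)).1.getD (pvAnchorKey a.1) 0)
           ++ " papers, expected >=" ++ PySem.Int.toStr a.2.2.1 ++ " — " ++ a.2.2.2)]]
     else acc)
    = acc ++ (pvIssueFor ((master.flatMap pvGetNames).filterMap
        (fun author => (pvKey? author).map (fun k => (k, author)))) a).toList := by
  have hp := outer_agree master PySem.Dict.empty PySem.Dict.empty (pvAnchorKey a.1) a.1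
  simp only [PySem.Dict.getD_empty] at hp
  rw [← List.foldl_flatMap (g := pvStepB (pvAnchorKey a.1)), stepB_char] at hp
  simp only [zero_add] at hp
  have hc := congrArg Prod.fst hp
  have hd := congrArg Prod.snd hp
  simp only at hc hd
  rw [hc, hd]
  show _ = acc ++ (if (pvMatches (pvAnchorKey a.1) (master.flatMap pvGetNames)).isEmpty then
      some [("level", "FAIL"), ("check", "anchor_faculty"),
        ("message", a.1 ++ " (" ++ a.2.1 ++ ") has 0 papers — " ++ a.2.2.2)]
    else if ((pvMatches (pvAnchorKey a.1) (master.flatMap pvGetNames)).length : Int) < a.2.2.1 then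
      some [("level", "WARN"), ("check", "anchor_faculty"),
        ("message", ((pvMatches (pvAnchorKey a.1) (master.flatMap pvGetNames)).getLast?.getD a.1)
          ++ " has " ++ PySem.Int.toStr ((pvMatches (pvAnchorKey a.1) (master.flatMap pvGetNames)).length : Int)
          ++ " papers, expected >=" ++ PySem.Int.toStr a.2.2.1 ++ " — " ++ a.2.2.2)]
    else none).toList
  by_cases hE : pvMatches (pvAnchorKey a.1) (master.flatMap pvGetNames) = []
  · simp [hE]
  · have hlen : (pvMatches (pvAnchorKey a.1) (master.flatMap pvGetNames)).length ≠ 0 := by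
      simpa [List.length_eq_zero_iff] using hE
    have h0 : ¬ (((pvMatches (pvAnchorKey a.1) (master.flatMap pvGetNames)).length : Int) = 0) := by
      exact_mod_cast hlen
    have hIE : (pvMatches (pvAnchorKey a.1) (master.flatMap pvGetNames)).isEmpty = false := by
      simp [hE]
    rw [if_neg h0]
    simp only [hIE, Bool.false_eq_true, if_false]
    split_ifs with hlt
    · simp
    · simp

-- A's whole issue loop equals B's filter-out-none construction
lemma issues_loop (master : List (List (String × List String)))
    (l : List (String × String × Int × String)) (acc : List (List (String × String))) :
    l.foldl (fun issues a =>
      if (master.foldl (fun cd p => (pvGetNames p).foldl pvStepA cd)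
            (PySem.Dict.empty, PySem.Dict.empty)).1.getD (pvAnchorKey a.1) 0 = 0 then
        issues ++ [[("level", "FAIL"), ("check", "anchor_faculty"),
          ("message", a.1 ++ " (" ++ a.2.1 ++ ") has 0 papers — " ++ a.2.2.2)]]
      else if (master.foldl (fun cd p => (pvGetNames p).foldl pvStepA cd)
            (PySem.Dict.empty, PySem.Dict.empty)).1.getD (pvAnchorKey a.1) 0 < a.2.2.1 then
        issues ++ [[("level", "WARN"), ("check", "anchor_faculty"),
          ("message", (master.foldl (fun cd p => (pvGetNames p).foldl pvStepA cd)
              (PySem.Dict.empty, PySem.Dict.empty)).2.getD (pvAnchorKey a.1) a.1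
            ++ " has " ++ PySem.Int.toStr ((master.foldl (fun cd p => (pvGetNames p).foldl pvStepA cd)
              (PySem.Dict.empty, PySem.Dict.empty)).1.getD (pvAnchorKey a.1) 0)
            ++ " papers, expected >=" ++ PySem.Int.toStr a.2.2.1 ++ " — " ++ a.2.2.2)]]
      else issues) acc
    = acc ++ (l.map (pvIssueFor ((master.flatMap pvGetNames).filterMap
        (fun author => (pvKey? author).map (fun k => (k, author)))))).filterMap id := by
  induction l generalizing acc with
  | nil => simp
  | cons a l ih =>
    rw [List.foldl_cons, anchor_step master a acc, ih]
    cases h : pvIssueFor ((master.flatMap pvGetNames).filterMap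
        (fun author => (pvKey? author).map (fun k => (k, author)))) a with
    | none => simp [h]
    | some v => simp [h]

-- ===== VERDICT (by name: the statement is the Claim_ definition above) =====
theorem check_anchor_faculty_spec : Claim_equal_check_anchor_faculty := by
  intro master _
  show check_anchor_faculty master = check_anchor_faculty_alt master
  exact (issues_loop master anchorFaculty []).trans (List.nil_append _)
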